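-- pv_equiv track=rewrite | github.com/halc8312/ESP | services/validation_service.py | get_issue_summary
-- ===== SOURCE A (Python) =====
-- def get_issue_summary(products_with_issues):
--     """
--     Get summary counts of issues.
--
--     Args:
--         products_with_issues: List of (product, issues) tuples
--
--     Returns:
--         Dict with counts: {"error_count": X, "warning_count": Y, "products_with_issues": Z}
--     """
--     error_count = 0
--     warning_count = 0
--     products_with_any_issue = 0
--
--     for product, issues in products_with_issues:
--         if issues:
--             products_with_any_issue += 1
--             for issue in issues:
--                 if issue["type"] == "error":
--                     error_count += 1
--                 else:
--                     warning_count += 1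
--
--     return {
--         "error_count": error_count,
--         "warning_count": warning_count,
--         "products_with_issues": products_with_any_issue
--     }
-- ===== SOURCE B (Python) =====
-- def get_issue_summary(products_with_issues):
--     all_issues = [i for _, issues in products_with_issues if issues for i in issues]
--     error_count = sum(1 for i in all_issues if i["type"] == "error")
--     return {
--         "error_count": error_count,
--         "warning_count": len(all_issues) - error_count,
--         "products_with_issues": sum(1 for _, issues in products_with_issues if issues),
--     }
-- ===== Notes on version B (the rewrite author's own statement) =====
-- stated objective: simpler
-- what changed: Replaced the single nested counting loop with three separate passes: flatten all issues once, count errors over the flat list, and derive warning_count by subtraction from the flat list's length instead of counting non-error issues.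
import Mathlib
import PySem

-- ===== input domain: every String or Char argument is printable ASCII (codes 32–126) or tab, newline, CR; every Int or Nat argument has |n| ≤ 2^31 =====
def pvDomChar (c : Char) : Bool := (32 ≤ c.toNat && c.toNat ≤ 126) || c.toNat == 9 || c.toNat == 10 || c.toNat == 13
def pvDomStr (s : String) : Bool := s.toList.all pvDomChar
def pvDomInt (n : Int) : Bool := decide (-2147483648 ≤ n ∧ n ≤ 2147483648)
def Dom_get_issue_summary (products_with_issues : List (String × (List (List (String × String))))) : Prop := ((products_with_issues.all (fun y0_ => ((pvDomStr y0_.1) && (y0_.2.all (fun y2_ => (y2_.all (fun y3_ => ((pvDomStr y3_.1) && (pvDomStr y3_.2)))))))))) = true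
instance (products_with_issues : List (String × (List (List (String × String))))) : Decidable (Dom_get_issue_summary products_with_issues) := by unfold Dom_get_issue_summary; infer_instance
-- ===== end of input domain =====

-- B replaces A's single nested counting loop by separate passes: flatten the issues once,
-- count errors on the flat list, and obtain warning_count by subtraction (objective: simpler).

-- ===== PORT A =====
-- issue["type"]: first-match lookup in the association list (exact; KeyError = none, excluded by Pre_)
def pvLookupType (d : List (String × String)) : Option String :=
  (d.find? (fun p => p.1 == "type")).map Prod.snd

def get_issue_summary (products_with_issues : List (String × (List (List (String × String))))) : List (String × Int) :=
  let st := products_with_issues.foldl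
    (fun (st : Int × Int × Int) pr =>
      if pr.2 ≠ [] then
        pr.2.foldl
          (fun (s : Int × Int × Int) issue =>
            if pvLookupType issue = some "error" then (s.1 + 1, s.2.1, s.2.2)
            else (s.1, s.2.1 + 1, s.2.2))
          (st.1, st.2.1, st.2.2 + 1)
      else st)
    (0, 0, 0)
  [("error_count", st.1), ("warning_count", st.2.1), ("products_with_issues", st.2.2)]

-- ===== PORT B =====
def get_issue_summary_alt (products_with_issues : List (String × (List (List (String × String))))) : List (String × Int) :=
  let all_issues := (products_with_issues.filter (fun pr => !pr.2.isEmpty)).flatMap Prod.snd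
  let error_count : Int := (all_issues.countP (fun i => pvLookupType i == some "error") : Nat)
  [("error_count", error_count),
   ("warning_count", (all_issues.length : Int) - error_count),
   ("products_with_issues", ((products_with_issues.countP (fun pr => !pr.2.isEmpty) : Nat) : Int))]

-- ===== PRECONDITION & SPEC =====
-- Pre_ excludes exactly the inputs where Python A raises KeyError: some issue dict lacks the "type" key
def Pre_get_issue_summary (products_with_issues : List (String × (List (List (String × String))))) : Prop :=
  ∀ pr ∈ products_with_issues, ∀ i ∈ pr.2, ∃ p ∈ i, p.1 = "type"
instance (products_with_issues : List (String × (List (List (String × String))))) : Decidable (Pre_get_issue_summary products_with_issues) := by unfold Pre_get_issue_summary; infer_instance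

def pvWitness_get_issue_summary : (List (String × (List (List (String × String))))) :=
  [("a", [[("type", "error")], [("type", "warning")]]), ("b", [])]

def Spec_get_issue_summary (products_with_issues : List (String × (List (List (String × String))))) (out : List (String × Int)) : Prop := out = get_issue_summary_alt products_with_issues
instance (products_with_issues : List (String × (List (List (String × String))))) (out : List (String × Int)) : Decidable (Spec_get_issue_summary products_with_issues out) := by unfold Spec_get_issue_summary; infer_instance

-- ===== CLAIM (what is proved, stated in full; the proofs are below) =====
def Claim_equal_get_issue_summary : Prop := ∀ (products_with_issues : List (String × (List (List (String × String))))), Dom_get_issue_summary products_with_issues → Pre_get_issue_summary products_with_issues → Spec_get_issue_summary products_with_issues (get_issue_summary products_with_issues)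

-- ===== LEMMAS AND PROOFS =====

lemma pv_inner (issues : List (List (String × String))) (e w p : Int) :
    issues.foldl
      (fun (s : Int × Int × Int) issue =>
        if pvLookupType issue = some "error" then (s.1 + 1, s.2.1, s.2.2)
        else (s.1, s.2.1 + 1, s.2.2)) (e, w, p)
    = (e + (issues.countP (fun i => pvLookupType i == some "error") : Nat),
       w + (issues.countP (fun i => !(pvLookupType i == some "error")) : Nat), p) := by
  induction issues generalizing e w p with
  | nil => simp
  | cons i t ih =>
    by_cases h : pvLookupType i = some "error" <;>
      simp [List.foldl_cons, h, ih] <;> try ring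

lemma pv_outer (pw : List (String × (List (List (String × String))))) (e w p : Int) :
    pw.foldl
      (fun (st : Int × Int × Int) pr =>
        if pr.2 ≠ [] then
          pr.2.foldl
            (fun (s : Int × Int × Int) issue =>
              if pvLookupType issue = some "error" then (s.1 + 1, s.2.1, s.2.2)
              else (s.1, s.2.1 + 1, s.2.2))
            (st.1, st.2.1, st.2.2 + 1)
        else st) (e, w, p)
    = (e + (((pw.filter (fun pr => !pr.2.isEmpty)).flatMap Prod.snd).countP
              (fun i => pvLookupType i == some "error") : Nat),
       w + (((pw.filter (fun pr => !pr.2.isEmpty)).flatMap Prod.snd).countP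
              (fun i => !(pvLookupType i == some "error")) : Nat),
       p + ((pw.countP (fun pr => !pr.2.isEmpty) : Nat))) := by
  induction pw generalizing e w p with
  | nil => simp
  | cons pr t ih =>
    rw [List.foldl_cons]
    by_cases h : pr.2 = []
    · rw [if_neg (not_not_intro h), ih]
      simp [h]
    · have hne : (!pr.2.isEmpty) = true := by simp [h]
      rw [if_pos h, pv_inner, ih]
      simp only [List.filter_cons, hne, if_pos, List.flatMap_cons, List.countP_append,
        List.countP_cons, Prod.mk.injEq]
      refine ⟨by push_cast; ring, by push_cast; ring, by push_cast; ring⟩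

lemma pv_counts (l : List (List (String × String))) :
    ((l.countP (fun i => !(pvLookupType i == some "error")) : Nat) : Int)
      = (l.length : Int) - ((l.countP (fun i => pvLookupType i == some "error") : Nat) : Int) := by
  have h := List.length_eq_countP_add_countP (p := fun i => pvLookupType i == some "error") (l := l)
  simp only [Bool.not_eq_true, Bool.decide_eq_false] at h ⊢
  omega

-- ===== VERDICT (by name: the statement is the Claim_ definition above) =====
theorem get_issue_summary_spec : Claim_equal_get_issue_summary := by
  intro pw _ _
  show _ = _
  simp only [get_issue_summary, get_issue_summary_alt, pv_outer, zero_add]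
  rw [pv_counts]
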